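-- pv_equiv track=rewrite | github.com/khaledfahmy123/IEEE-ZSB-Technical-Rookies-22 | Task-3/#8.py | freq
-- ===== SOURCE A (Python) =====
-- def freq(arr, n):
--     Hash = dict()
--     count = 0
--     for i in range(n):
--         if arr[i] in Hash.keys():
--             Hash.pop(arr[i])
--             count += 1
--         else:
--             Hash[arr[i]] = 1
--
--     return count
-- ===== SOURCE B (Python) =====
-- def freq(arr, n):
--     xs = sorted(arr[i] for i in range(n))
--     total = 0
--     i = 0
--     while i + 1 < len(xs):
--         if xs[i] == xs[i + 1]:
--             total += 1
--             i += 2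
--         else:
--             i += 1
--     return total
-- ===== Notes on version B (the rewrite author's own statement) =====
-- stated objective: alternative
-- what changed: Replaces the in/out dict-toggle simulation with sort-then-scan: sort the read prefix, then a single index walk counting adjacent equal pairs (skipping both members of a matched pair), which yields floor(k/2) per value group.
import Mathlib
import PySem

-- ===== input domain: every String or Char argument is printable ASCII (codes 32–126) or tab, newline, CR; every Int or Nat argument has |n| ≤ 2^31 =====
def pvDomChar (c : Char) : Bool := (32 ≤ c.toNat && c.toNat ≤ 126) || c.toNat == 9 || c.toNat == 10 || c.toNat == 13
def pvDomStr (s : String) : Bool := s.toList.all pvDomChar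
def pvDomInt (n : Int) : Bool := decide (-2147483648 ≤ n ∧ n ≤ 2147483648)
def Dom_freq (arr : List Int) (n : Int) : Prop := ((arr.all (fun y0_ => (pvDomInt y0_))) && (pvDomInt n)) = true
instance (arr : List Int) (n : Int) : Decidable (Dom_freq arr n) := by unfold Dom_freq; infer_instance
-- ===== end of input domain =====

-- B replaces A's in/out dict-toggle simulation by sort-then-scan (sort the read prefix,
-- count adjacent equal pairs, skipping both members of a matched pair); objective: alternative.


-- ===== PORT A =====
-- 'arr[i] in Hash.keys()' is Dict.contains; 'Hash.pop(arr[i])' on a key the branch just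
-- checked to be present is Dict.erase (the popped value is discarded by the Python).
def freq (arr : List Int) (n : Int) : Int :=
  ((PySem.List.pyRange 0 n 1).foldl
    (fun (s : PySem.Dict Int Int × Int) i =>
      if s.1.contains (PySem.List.pyGetD arr i 0) then
        (s.1.erase (PySem.List.pyGetD arr i 0), s.2 + 1)
      else
        (s.1.insert (PySem.List.pyGetD arr i 0) 1, s.2))
    (PySem.Dict.empty, 0)).2

-- ===== PORT B =====
-- Source B's while loop over the index i, as a recursion decreasing on len(xs) - i;
-- the guard i+1 < len(xs) keeps both reads in range, so xs[i] / xs[i+1] are exact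
def pvScanIdx (xs : List Int) (i : Nat) (total : Int) : Int :=
  if h : i + 1 < xs.length then
    if xs[i]'(by omega) == xs[i + 1]'h then pvScanIdx xs (i + 2) (total + 1)
    else pvScanIdx xs (i + 1) total
  else total
termination_by xs.length - i

def freq_alt (arr : List Int) (n : Int) : Int :=
  pvScanIdx (PySem.List.sorted ((PySem.List.pyRange 0 n 1).map
              (fun i => PySem.List.pyGetD arr i 0)) (fun x => x) false) 0 0

-- ===== PRECONDITION & SPEC =====
-- Pre_ excludes only n > len(arr), where both A and B raise IndexError at arr[i].
def Pre_freq (arr : List Int) (n : Int) : Prop := n ≤ (arr.length : Int)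
instance (arr : List Int) (n : Int) : Decidable (Pre_freq arr n) := by unfold Pre_freq; infer_instance
def pvWitness_freq : List Int × Int := ([1, 2, 1], 3)

def Spec_freq (arr : List Int) (n : Int) (out : Int) : Prop := out = freq_alt arr n
instance (arr : List Int) (n : Int) (out : Int) : Decidable (Spec_freq arr n out) := by unfold Spec_freq; infer_instance

-- ===== CLAIM (what is proved, stated in full; the proofs are below) =====
def Claim_equal_freq : Prop := ∀ (arr : List Int) (n : Int), Dom_freq arr n → Pre_freq arr n → Spec_freq arr n (freq arr n)

-- ===== LEMMAS AND PROOFS =====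

-- the indices 0..n-1 read exactly the prefix arr.take n.toNat (n ≤ len arr; n < 0 gives [])
lemma pv_map_pyGetD_take (arr : List Int) (n : Int) (h : n ≤ (arr.length : Int)) :
    (PySem.List.pyRange 0 n 1).map (fun i => PySem.List.pyGetD arr i 0) = arr.take n.toNat := by
  rw [PySem.List.pyRange_one, List.map_map]
  apply List.ext_getElem
  · simp; omega
  · intro k h1 h2
    simp only [List.getElem_map, List.getElem_range, Function.comp_apply, List.getElem_take]
    have hk : k < arr.length := by simp at h1; omega
    simp [PySem.List.pyGetD_natCast, List.getD, List.getElem?_eq_getElem hk]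

lemma pv_contains_erase (d : PySem.Dict Int Int) (x v : Int) :
    (d.erase x).contains v = (!(v == x) && d.contains v) := by
  rcases d with ⟨items⟩
  show ((items.filter (fun q => !(q.1 == x))).any (fun q => q.1 == v))
      = (!(v == x) && items.any (fun q => q.1 == v))
  induction items with
  | nil => simp
  | cons p rest ih =>
    rw [List.filter_cons]
    by_cases hpx : p.1 = x
    · rw [if_neg (by simp [hpx]), ih, List.any_cons]
      by_cases hv : v = x
      · simp [hv]
      · simp [show (p.1 == v) = false from by simp [hpx]; exact fun h => hv h.symm]
    · rw [if_pos (by simp [hpx]), List.any_cons, List.any_cons, ih]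
      by_cases hpv : p.1 = v
      · have hvx : (v == x) = false := by
          simp; rintro rfl; exact hpx hpv
        simp [hpv, hvx]
      · simp [show (p.1 == v) = false from by simp [hpv]]

lemma pv_nodup_keys_erase (d : PySem.Dict Int Int) (x : Int) (h : d.keys.Nodup) :
    (d.erase x).keys.Nodup := by
  have hsub : (d.erase x).items.Sublist d.items := by
    simpa [PySem.Dict.erase] using List.filter_sublist (l := d.items) _
  unfold PySem.Dict.keys at h ⊢
  exact (hsub.map _).nodup h

-- summing f over a nodup list after bumping f's value at one member x by δ
lemma pv_sum_map_update (l : List Int) (hnd : l.Nodup) (x : Int) (hx : x ∈ l)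
    (f f' : Int → Nat) (δ : Nat) (hne : ∀ y ∈ l, y ≠ x → f' y = f y) (hx' : f' x = f x + δ) :
    (l.map f').sum = (l.map f).sum + δ := by
  induction l with
  | nil => cases hx
  | cons a l ih =>
    rcases List.mem_cons.mp hx with rfl | hx
    · have hrest : ∀ y ∈ l, f' y = f y := by
        intro y hy
        exact hne y (List.mem_cons_of_mem _ hy) (fun hyx => (List.nodup_cons.mp hnd).1 (hyx ▸ hy))
      simp [hx', List.map_congr_left hrest]; omega
    · have ha : f' a = f a :=
        hne a (List.mem_cons_self) (fun hax => (List.nodup_cons.mp hnd).1 (hax ▸ hx))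
      have := ih (List.nodup_cons.mp hnd).2 hx
        (fun y hy => hne y (List.mem_cons_of_mem _ hy))
      simp [ha, this]; omega

lemma pv_ofList_append_singleton (xs : List Int) (x : Int) :
    PySem.Set.ofList (xs ++ [x]) =
      if x ∈ xs then PySem.Set.ofList xs else PySem.Set.ofList xs ++ [x] := by
  have : PySem.Set.ofList (xs ++ [x]) = PySem.Set.add (PySem.Set.ofList xs) x := by
    simp [PySem.Set.ofList, List.foldl_append]
  rw [this, PySem.Set.add]
  by_cases hx : x ∈ xs
  · simp [PySem.Set.contains, List.elem_iff, (PySem.Set.mem_ofList xs x).mpr hx, hx]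
  · simp [PySem.Set.contains, List.elem_iff, hx,
      fun h => hx ((PySem.Set.mem_ofList xs x).mp h)]

-- invariant of A's toggle loop: keys stay nodup, membership = odd count so far,
-- and the counter equals the half-count sum over the distinct elements seen
lemma pv_A_fold (xs : List Int) :
    ((xs.foldl (fun (s : PySem.Dict Int Int × Int) x =>
        if s.1.contains x then (s.1.erase x, s.2 + 1) else (s.1.insert x 1, s.2))
      (PySem.Dict.empty, 0)).1.keys.Nodup)
  ∧ (∀ v, (xs.foldl (fun (s : PySem.Dict Int Int × Int) x =>
        if s.1.contains x then (s.1.erase x, s.2 + 1) else (s.1.insert x 1, s.2))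
      (PySem.Dict.empty, 0)).1.contains v = (xs.count v % 2 == 1))
  ∧ (xs.foldl (fun (s : PySem.Dict Int Int × Int) x =>
        if s.1.contains x then (s.1.erase x, s.2 + 1) else (s.1.insert x 1, s.2))
      (PySem.Dict.empty, 0)).2
      = (((PySem.Set.ofList xs).map (fun k => xs.count k / 2)).sum : Nat) := by
  induction xs using List.reverseRecOn with
  | nil =>
    refine ⟨?_, ?_, ?_⟩ <;>
      simp [PySem.Dict.empty, PySem.Dict.contains, PySem.Dict.keys, PySem.Set.ofList]
  | append_singleton xs x ih =>
    obtain ⟨ih1, ih2, ih3⟩ := ih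
    simp only [List.foldl_append, List.foldl_cons, List.foldl_nil]
    set p := xs.foldl (fun (s : PySem.Dict Int Int × Int) x =>
        if s.1.contains x then (s.1.erase x, s.2 + 1) else (s.1.insert x 1, s.2))
      (PySem.Dict.empty, 0) with hp
    by_cases hc : p.1.contains x = true
    · -- x present: count of x so far is odd
      have hk : xs.count x % 2 = 1 := by
        have := (ih2 x).symm.trans hc; simpa using this
      have hxmem : x ∈ xs := by
        rcases List.count_pos_iff.mp (show 0 < xs.count x by omega) with h; exact h
      refine ⟨?_, ?_, ?_⟩
      · simpa [hc] using pv_nodup_keys_erase p.1 x ih1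
      · intro v
        simp only [hc, if_pos, pv_contains_erase, ih2 v]
        by_cases hv : v = x
        · rw [hv]
          have hcc : (xs ++ [x]).count x = xs.count x + 1 := by
            simp [List.count_append]
          simp [hcc, Nat.add_mod, hk]
        · have hcc : (xs ++ [x]).count v = xs.count v := by
            simp [List.count_append, List.count_singleton',
              show ¬x = v from fun h => hv h.symm]
          simp [hcc, hv] <;> omega
      · simp only [hc, if_pos]
        rw [pv_ofList_append_singleton, if_pos hxmem]
        have hsum := pv_sum_map_update (PySem.Set.ofList xs) (PySem.Set.nodup_ofList xs) x
          ((PySem.Set.mem_ofList xs x).mpr hxmem)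
          (fun k => xs.count k / 2) (fun k => (xs ++ [x]).count k / 2) 1
          (fun y _ hy => by simp [List.count_append, List.count_singleton',
            show ¬x = y from fun h => hy h.symm])
          (by simp [List.count_append]; omega)
        rw [hsum, ih3]; push_cast; ring
    · -- x absent: count of x so far is even
      have hcf : p.1.contains x = false := by simpa using hc
      have hk : xs.count x % 2 = 0 := by
        have h2 := ih2 x
        rw [hcf] at h2
        have h3 : ¬ (xs.count x % 2 = 1) := by simpa using h2.symm
        omega
      rw [if_neg hc]
      refine ⟨?_, ?_, ?_⟩
      · exact PySem.Dict.nodup_keys_insert p.1 x 1 ih1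
      · intro v
        show (p.1.insert x 1).contains v = _
        rw [PySem.Dict.contains_insert, ih2 v]
        by_cases hv : v = x
        · rw [hv]
          have hcc : (xs ++ [x]).count x = xs.count x + 1 := by
            simp [List.count_append]
          simp [hcc, Nat.add_mod, hk]
        · have hcc : (xs ++ [x]).count v = xs.count v := by
            simp [List.count_append, List.count_singleton',
              show ¬x = v from fun h => hv h.symm]
          simp [hcc, hv] <;> omega
      · show p.2 = _
        rw [pv_ofList_append_singleton]
        by_cases hxmem : x ∈ xs
        · rw [if_pos hxmem]
          have hcong : ∀ y ∈ PySem.Set.ofList xs,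
              (xs ++ [x]).count y / 2 = xs.count y / 2 := by
            intro y _
            by_cases hy : y = x
            · rw [hy]
              have hcc : (xs ++ [x]).count x = xs.count x + 1 := by
                simp [List.count_append]
              rw [hcc]; omega
            · simp [List.count_append, List.count_singleton',
                show ¬x = y from fun h => hy h.symm]
          rw [List.map_congr_left hcong, ih3]
        · rw [if_neg hxmem]
          have h0 : xs.count x = 0 := List.count_eq_zero_of_not_mem hxmem
          have hcong : ∀ y ∈ PySem.Set.ofList xs,
              (xs ++ [x]).count y / 2 = xs.count y / 2 := by
            intro y hy
            have hyx : y ≠ x := fun h => hxmem (h ▸ (PySem.Set.mem_ofList xs y).mp hy)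
            simp [List.count_append, List.count_singleton',
              show ¬x = y from fun h => hyx h.symm]
          have hlast : (xs ++ [x]).count x / 2 = 0 := by
            simp [List.count_append, h0]
          simp only [List.map_append, List.map_singleton, List.sum_append, List.sum_singleton]
          rw [List.map_congr_left hcong, hlast, ih3]
          push_cast; ring

-- ===== B-side lemmas =====

-- proof-side view of the index scan: the same pair scan on the remaining suffix
def pvScan : List Int → Int → Int
  | x :: y :: rest, total => if x == y then pvScan rest (total + 1) else pvScan (y :: rest) total
  | _, total => total

lemma pv_scanIdx_eq_scan_drop (xs : List Int) (i : Nat) (t : Int) :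
    pvScanIdx xs i t = pvScan (xs.drop i) t := by
  induction hn : xs.length - i using Nat.strong_induction_on generalizing i t with
  | _ N ih =>
    rw [pvScanIdx]
    by_cases h : i + 1 < xs.length
    · have hi : i < xs.length := by omega
      have hdrop : xs.drop i = xs[i] :: xs[i + 1] :: xs.drop (i + 2) := by
        rw [List.drop_eq_getElem_cons hi, List.drop_eq_getElem_cons h]
      rw [dif_pos h, hdrop]
      by_cases hab : xs[i] = xs[i + 1]
      · have hb : (xs[i] == xs[i + 1]) = true := by simp [hab]
        simp only [pvScan, hb, if_pos]
        exact ih (xs.length - (i + 2)) (by omega) (i + 2) (t + 1) rfl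
      · have hb : (xs[i] == xs[i + 1]) = false := by simp [hab]
        simp only [pvScan, hb, Bool.false_eq_true, if_neg, not_false_iff]
        rw [ih (xs.length - (i + 1)) (by omega) (i + 1) t rfl,
          List.drop_eq_getElem_cons h]
    · rw [dif_neg h]
      have hle : xs.length ≤ i + 1 := by omega
      rcases hd : xs.drop i with _ | ⟨a, rest⟩
      · simp [pvScan]
      · have hr : rest = [] := by
          have hl : xs.length - i = rest.length + 1 := by
            simpa using congrArg List.length hd
          exact List.eq_nil_of_length_eq_zero (by omega)
        simp [hr, pvScan]

-- the accumulator of pvScan factors out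
lemma pv_scan_acc (l : List Int) (t : Int) : pvScan l t = t + pvScan l 0 := by
  induction hn : l.length using Nat.strong_induction_on generalizing l t with
  | _ N ih =>
    match l with
    | [] => simp [pvScan]
    | [a] => simp [pvScan]
    | a :: b :: rest =>
      by_cases hab : a = b
      · subst hab
        simp only [pvScan, BEq.rfl, if_pos]
        rw [ih rest.length (by simp at hn; omega) rest (t + 1) rfl,
            ih rest.length (by simp at hn; omega) rest (0 + 1) rfl]
        ring
      · have h : (a == b) = false := by simp [hab]
        simp only [pvScan, h, Bool.false_eq_true, if_neg, not_false_iff]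
        exact ih (b :: rest).length (by simp at hn ⊢; omega) (b :: rest) t rfl

-- scanning a run of k equal elements followed by a run-free remainder yields k/2 pairs
lemma pv_scan_replicate (k : Nat) (a : Int) (r : List Int) (ha : a ∉ r) :
    pvScan (List.replicate k a ++ r) 0 = ((k / 2 : Nat) : Int) + pvScan r 0 := by
  induction k using Nat.strong_induction_on with
  | _ k ih =>
    match k with
    | 0 => simp
    | 1 =>
      cases r with
      | nil => simp [pvScan]
      | cons b r' =>
        have hab : (a == b) = false := by
          simp; rintro rfl; exact ha List.mem_cons_self
        simp [pvScan, hab]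
    | (k + 2) =>
      have : List.replicate (k + 2) a ++ r = a :: a :: (List.replicate k a ++ r) := by
        simp [List.replicate_succ]
      rw [this]
      simp only [pvScan, BEq.rfl, if_pos]
      rw [pv_scan_acc, ih k (by omega) ]
      have : (k + 2) / 2 = k / 2 + 1 := by omega
      rw [this]; push_cast; ring

-- a ∉ r preserved through Set.add-folding with a in the accumulator
lemma pv_foldl_add_cons (r : List Int) : ∀ (a : Int) (s : List Int), a ∉ r →
    List.foldl PySem.Set.add (a :: s) r = a :: List.foldl PySem.Set.add s r := by
  induction r with
  | nil => intro a s _; rfl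
  | cons x r ih =>
    intro a s ha
    have hxa : (x == a) = false := by
      simp; rintro rfl; exact ha List.mem_cons_self
    have hstep : PySem.Set.add (a :: s) x = a :: PySem.Set.add s x := by
      simp only [PySem.Set.add, PySem.Set.contains, List.elem_cons, hxa]
      split_ifs with h <;> simp
    rw [List.foldl_cons, hstep, List.foldl_cons,
      ih a (PySem.Set.add s x) (fun h => ha (List.mem_cons_of_mem _ h))]

lemma pv_ofList_replicate_append (k : Nat) (a : Int) (r : List Int) (ha : a ∉ r) :
    PySem.Set.ofList (List.replicate (k + 1) a ++ r) = a :: PySem.Set.ofList r := by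
  have hrep : List.foldl PySem.Set.add ([] : List Int) (List.replicate (k + 1) a) = [a] := by
    induction k with
    | zero => rfl
    | succ m ihm =>
      have : List.replicate (m + 1 + 1) a = List.replicate (m + 1) a ++ [a] := by
        simp [List.replicate_succ']
      rw [this, List.foldl_append, ihm]
      simp [PySem.Set.add, PySem.Set.contains]
  show List.foldl PySem.Set.add ([] : List Int) _ = _
  rw [List.foldl_append, hrep]
  exact pv_foldl_add_cons r a [] ha

-- a sorted list splits as a maximal head run followed by a sorted remainder avoiding a
lemma pv_sorted_split (a : Int) (t : List Int) (h : (a :: t).Pairwise (· ≤ ·)) :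
    ∃ k r, a :: t = List.replicate (k + 1) a ++ r ∧ a ∉ r ∧ r.Pairwise (· ≤ ·) := by
  induction t generalizing a with
  | nil => exact ⟨0, [], by simp, by simp, by simp⟩
  | cons b t ih =>
    have htail : (b :: t).Pairwise (· ≤ ·) := (List.pairwise_cons.mp h).2
    by_cases hba : b = a
    · subst hba
      obtain ⟨k, r, heq, har, hsr⟩ := ih b htail
      refine ⟨k + 1, r, ?_, har, hsr⟩
      rw [show List.replicate (k + 1 + 1) b = b :: List.replicate (k + 1) b by
        simp [List.replicate_succ]]
      rw [List.cons_append, ← heq]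
    · refine ⟨0, b :: t, by simp, ?_, htail⟩
      intro hmem
      have hab : a ≤ b := (List.pairwise_cons.mp h).1 b List.mem_cons_self
      have hba' : b ≤ a := by
        rcases List.mem_cons.mp hmem with rfl | hmem'
        · exact le_refl a
        · exact (List.pairwise_cons.mp htail).1 a hmem'
      exact hba (le_antisymm hba' hab)

-- sort-then-scan computes the half-count sum over the distinct elements
lemma pv_scan_sorted (ys : List Int) (hs : ys.Pairwise (· ≤ ·)) :
    pvScan ys 0 = (((PySem.Set.ofList ys).map (fun k => ys.count k / 2)).sum : Nat) := by
  induction hn : ys.length using Nat.strong_induction_on generalizing ys with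
  | _ N ih =>
    cases ys with
    | nil => simp [pvScan, PySem.Set.ofList]
    | cons a t =>
      obtain ⟨k, r, heq, har, hsr⟩ := pv_sorted_split a t hs
      rw [heq, pv_scan_replicate (k + 1) a r har, pv_ofList_replicate_append k a r har]
      have hlen : r.length < N := by
        have hleq := congrArg List.length heq
        simp at hleq hn; omega
      have hcr : ∀ y ∈ PySem.Set.ofList r,
          (List.replicate (k + 1) a ++ r).count y = r.count y := by
        intro y hy
        have hya : a ≠ y := fun h => har (h ▸ (PySem.Set.mem_ofList r y).mp hy)
        simp [List.count_append, List.count_replicate, if_neg hya]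
      have hca : (List.replicate (k + 1) a ++ r).count a = k + 1 := by
        simp [List.count_append, List.count_replicate, List.count_eq_zero_of_not_mem har]
      rw [List.map_cons, List.sum_cons, hca, List.map_congr_left (fun y hy => by rw [hcr y hy]),
        ih r.length hlen r hsr rfl]
      push_cast; ring

-- counts and distinct elements are permutation-invariant, hence so is the half-count sum
lemma pv_halfsum_perm (ys xs : List Int) (hp : ys.Perm xs) :
    ((PySem.Set.ofList ys).map (fun k => ys.count k / 2)).sum
      = ((PySem.Set.ofList xs).map (fun k => xs.count k / 2)).sum := by
  have hsetperm : (PySem.Set.ofList ys).Perm (PySem.Set.ofList xs) := by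
    rw [List.perm_ext_iff_of_nodup (PySem.Set.nodup_ofList ys) (PySem.Set.nodup_ofList xs)]
    intro a
    rw [PySem.Set.mem_ofList, PySem.Set.mem_ofList]
    exact ⟨fun h => hp.mem_iff.mp h, fun h => hp.mem_iff.mpr h⟩
  calc ((PySem.Set.ofList ys).map (fun k => ys.count k / 2)).sum
      = ((PySem.Set.ofList ys).map (fun k => xs.count k / 2)).sum := by
        exact congrArg List.sum (List.map_congr_left (fun y _ => by rw [hp.count_eq]))
    _ = ((PySem.Set.ofList xs).map (fun k => xs.count k / 2)).sum :=
        (hsetperm.map _).sum_eq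

-- ===== VERDICT (by name: the statement is the Claim_ definition above) =====
theorem freq_spec : Claim_equal_freq := by
  intro arr n _ hpre
  show freq arr n = freq_alt arr n
  unfold freq freq_alt
  have hmap := pv_map_pyGetD_take arr n hpre
  rw [hmap]
  set xs := arr.take n.toNat with hxs
  have hA : (PySem.List.pyRange 0 n 1).foldl
      (fun (s : PySem.Dict Int Int × Int) i =>
        if s.1.contains (PySem.List.pyGetD arr i 0) then
          (s.1.erase (PySem.List.pyGetD arr i 0), s.2 + 1)
        else
          (s.1.insert (PySem.List.pyGetD arr i 0) 1, s.2))
      (PySem.Dict.empty, 0)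
    = xs.foldl (fun (s : PySem.Dict Int Int × Int) x =>
        if s.1.contains x then (s.1.erase x, s.2 + 1) else (s.1.insert x 1, s.2))
      (PySem.Dict.empty, 0) := by
    rw [← hmap, List.foldl_map]
  rw [hA]
  obtain ⟨-, -, h3⟩ := pv_A_fold xs
  rw [h3]
  rw [pv_scanIdx_eq_scan_drop, List.drop_zero]
  set ys := PySem.List.sorted xs (fun x => x) false with hys
  have hsorted : ys.Pairwise (· ≤ ·) := PySem.List.sorted_pairwise xs (fun x => x)
  have hperm : ys.Perm xs := PySem.List.sorted_perm xs (fun x => x) false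
  rw [pv_scan_sorted ys hsorted, pv_halfsum_perm ys xs hperm]
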